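-- pv_equiv track=rewrite | github.com/MartynasDziugas/TermSync | src/services/translator_review_service.py | _ranges_highlight_full_words
-- ===== SOURCE A (Python) =====
-- def _merge_ranges(ranges: list[tuple[int, int]]) -> list[tuple[int, int]]:
--     if not ranges:
--         return []
--     sorted_r = sorted(ranges, key=lambda t: (t[0], t[1]))
--     out: list[tuple[int, int]] = []
--     cs, ce = sorted_r[0]
--     for lo, hi in sorted_r[1:]:
--         if lo <= ce:
--             ce = max(ce, hi)
--         else:
--             out.append((cs, ce))
--             cs, ce = lo, hi
--     out.append((cs, ce))
--     return out
--
-- def _whitespace_word_spans(s: str) -> list[tuple[int, int]]: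
--     """Ne tarpų segmentai [lo, hi) — „žodis“ pagal whitespace."""
--     words: list[tuple[int, int]] = []
--     n = len(s)
--     i = 0
--     while i < n:
--         if s[i].isspace():
--             i += 1
--             continue
--         j = i
--         while j < n and not s[j].isspace():
--             j += 1
--         words.append((i, j))
--         i = j
--     return words
--
-- def _ranges_highlight_full_words(s: str, raw: list[tuple[int, int]]) -> list[tuple[int, int]]:
--     """Jei paryškinta bent viena žodžio raidė — žymimas visas tas žodis; nesujungiami skirtingi žodžiai."""
--     if not raw:
--         return []
--     covered: set[int] = set()
--     for lo, hi in raw: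
--         lo = max(0, min(lo, len(s)))
--         hi = max(lo, min(hi, len(s)))
--         for k in range(lo, hi):
--             covered.add(k)
--     picked: list[tuple[int, int]] = []
--     for ws, we in _whitespace_word_spans(s):
--         if ws < we and any(k in covered for k in range(ws, we)):
--             picked.append((ws, we))
--     return _merge_ranges(picked)
-- ===== SOURCE B (Python) =====
-- def _ranges_highlight_full_words(s: str, raw: list[tuple[int, int]]) -> list[tuple[int, int]]:
--     """Interval arithmetic instead of a per-character covered set: clamp the raw
--     ranges once, then a single whitespace-word scan picks each word that
--     intersects any clamped range (no set, no per-char loops, no final merge)."""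
--     n = len(s)
--     spans: list[tuple[int, int]] = []
--     for lo, hi in raw:
--         lo = max(0, min(lo, n))
--         hi = max(lo, min(hi, n))
--         if lo < hi:
--             spans.append((lo, hi))
--     out: list[tuple[int, int]] = []
--     i = 0
--     while i < n:
--         if s[i].isspace():
--             i += 1
--             continue
--         j = i
--         while j < n and not s[j].isspace():
--             j += 1
--         if any(lo < j and i < hi for lo, hi in spans):
--             out.append((i, j))
--         i = j
--     return out
-- ===== Notes on version B (the rewrite author's own statement) =====
-- stated objective: faster
-- what changed: B replaces A's per-character covered set and per-character any() word test by direct interval arithmetic: raw ranges are clamped once and each whitespace word is picked by an interval-overlap test, and the (always no-op) final sort-and-merge of the picked word spans is dropped.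
import Mathlib
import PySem

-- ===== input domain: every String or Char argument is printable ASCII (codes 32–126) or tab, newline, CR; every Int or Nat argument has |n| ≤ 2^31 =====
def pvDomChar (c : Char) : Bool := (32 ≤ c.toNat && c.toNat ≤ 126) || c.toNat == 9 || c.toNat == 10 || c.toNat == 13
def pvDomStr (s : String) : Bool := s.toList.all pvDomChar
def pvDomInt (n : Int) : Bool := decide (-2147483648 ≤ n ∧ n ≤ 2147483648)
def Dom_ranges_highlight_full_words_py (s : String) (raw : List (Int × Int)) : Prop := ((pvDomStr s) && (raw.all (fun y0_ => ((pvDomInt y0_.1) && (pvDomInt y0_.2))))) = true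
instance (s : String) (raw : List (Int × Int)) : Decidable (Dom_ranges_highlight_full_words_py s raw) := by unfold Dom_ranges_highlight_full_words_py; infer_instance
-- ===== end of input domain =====

-- B replaces A's per-character covered set by clamped-interval overlap tests per whitespace word
-- (and drops A's final sort-and-merge of the picked word spans, which never merges anything).


-- ===== PORT A =====

-- length of the maximal non-whitespace prefix (the inner `while j < n and not s[j].isspace()` loop)
def pvRunLen : List Char → Nat
  | [] => 0
  | c :: tl => if PySem.Chars.isspace c then 0 else pvRunLen tl + 1

-- `_whitespace_word_spans`: the outer while-loop over the string, position carried in `i`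
def pvWordsAux : List Char → Int → List (Int × Int)
  | [], _ => []
  | c :: tl, i =>
    if PySem.Chars.isspace c then pvWordsAux tl (i + 1)
    else
      let k : Nat := pvRunLen tl + 1
      (i, i + (k : Int)) :: pvWordsAux (tl.drop (pvRunLen tl)) (i + (k : Int))
termination_by cs => cs.length
decreasing_by all_goals simp

-- the clamping `lo = max(0, min(lo, len(s))); hi = max(lo, min(hi, len(s)))` both versions perform
def pvClamp (n : Int) (p : Int × Int) : Int × Int :=
  (max 0 (min p.1 n), max (max 0 (min p.1 n)) (min p.2 n))

-- `_merge_ranges` loop over sorted_r[1:]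
def pvMergeLoop (out : List (Int × Int)) (cs ce : Int) : List (Int × Int) → List (Int × Int)
  | [] => out ++ [(cs, ce)]
  | (lo, hi) :: rest =>
    if lo ≤ ce then pvMergeLoop out cs (max ce hi) rest
    else pvMergeLoop (out ++ [(cs, ce)]) lo hi rest

def pvMergeRanges (ranges : List (Int × Int)) : List (Int × Int) :=
  if ranges = [] then []
  else
    match PySem.List.sorted2 ranges (fun t => t.1) (fun t => t.2) with
    | [] => []
    | (cs, ce) :: rest => pvMergeLoop [] cs ce rest

def ranges_highlight_full_words_py (s : String) (raw : List (Int × Int)) : List (Int × Int) :=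
  if raw = [] then []
  else
    pvMergeRanges ((pvWordsAux s.toList 0).filter
      (fun p => decide (p.1 < p.2) &&
        (PySem.List.pyRange p.1 p.2).any (fun k => PySem.Set.contains
          (raw.foldl
            (fun cov r =>
              (PySem.List.pyRange (pvClamp (PySem.Str.len s) r).1
                (pvClamp (PySem.Str.len s) r).2).foldl PySem.Set.add cov) PySem.Set.empty) k)))

-- ===== PORT B =====

-- B's single fused scan: the same word loop, but each word is kept by an interval-overlap test
def pvPickAux (spans : List (Int × Int)) : List Char → Int → List (Int × Int)
  | [], _ => []
  | c :: tl, i =>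
    if PySem.Chars.isspace c then pvPickAux spans tl (i + 1)
    else
      let k : Nat := pvRunLen tl + 1
      if spans.any (fun q => decide (q.1 < i + (k : Int)) && decide (i < q.2))
      then (i, i + (k : Int)) :: pvPickAux spans (tl.drop (pvRunLen tl)) (i + (k : Int))
      else pvPickAux spans (tl.drop (pvRunLen tl)) (i + (k : Int))
termination_by cs => cs.length
decreasing_by all_goals simp

def ranges_highlight_full_words_py_alt (s : String) (raw : List (Int × Int)) : List (Int × Int) :=
  pvPickAux
    (raw.foldl
      (fun acc p =>
        if (pvClamp (PySem.Str.len s) p).1 < (pvClamp (PySem.Str.len s) p).2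
        then acc ++ [pvClamp (PySem.Str.len s) p] else acc) [])
    s.toList 0

-- ===== PRECONDITION & SPEC =====
def Spec_ranges_highlight_full_words_py (s : String) (raw : List (Int × Int)) (out : List (Int × Int)) : Prop := out = ranges_highlight_full_words_py_alt s raw
instance (s : String) (raw : List (Int × Int)) (out : List (Int × Int)) : Decidable (Spec_ranges_highlight_full_words_py s raw out) := by unfold Spec_ranges_highlight_full_words_py; infer_instance

-- ===== CLAIM (what is proved, stated in full; the proofs are below) =====
def Claim_equal_ranges_highlight_full_words_py : Prop := ∀ (s : String) (raw : List (Int × Int)), Dom_ranges_highlight_full_words_py s raw → Spec_ranges_highlight_full_words_py s raw (ranges_highlight_full_words_py s raw)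

-- ===== LEMMAS AND PROOFS =====

-- B's fused scan is A's word scan filtered by the overlap predicate
theorem pvPickAux_eq_filter (spans : List (Int × Int)) (cs : List Char) (i : Int) :
    pvPickAux spans cs i = (pvWordsAux cs i).filter
      (fun p => spans.any (fun q => decide (q.1 < p.2) && decide (p.1 < q.2))) := by
  induction cs, i using pvWordsAux.induct with
  | case1 i => simp [pvPickAux, pvWordsAux]
  | case2 c tl i hsp ih => simp [pvPickAux, pvWordsAux, hsp, ih]
  | case3 c tl i hsp k ih =>
    simp only [pvPickAux, pvWordsAux, hsp, if_false, Bool.false_eq_true, List.filter_cons]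
    have ihk : pvPickAux spans (List.drop (pvRunLen tl) tl) (i + ((pvRunLen tl : Int) + 1)) =
        List.filter (fun p => spans.any fun q => decide (q.1 < p.2) && decide (p.1 < q.2))
          (pvWordsAux (List.drop (pvRunLen tl) tl) (i + ((pvRunLen tl : Int) + 1))) := by
      push_cast at ih; exact ih
    split <;> simp_all

theorem pvWordsAux_lb (cs : List Char) (i : Int) :
    ∀ p ∈ pvWordsAux cs i, i ≤ p.1 ∧ p.1 < p.2 := by
  induction cs, i using pvWordsAux.induct with
  | case1 i => simp [pvWordsAux]
  | case2 c tl i hsp ih =>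
    intro p hp
    rw [pvWordsAux, if_pos hsp] at hp
    have := ih p hp; omega
  | case3 c tl i hsp k ih =>
    intro p hp
    rw [pvWordsAux, if_neg (by simp [hsp])] at hp
    rcases List.mem_cons.mp hp with rfl | hmem
    · constructor <;> simp
    · have := ih p hmem; simp at this ⊢; omega

theorem pvRunLen_drop_space (cs : List Char) :
    ∀ d tl', cs.drop (pvRunLen cs) = d :: tl' → PySem.Chars.isspace d = true := by
  induction cs with
  | nil => simp
  | cons c tl ih =>
    intro d tl' h
    by_cases hsp : PySem.Chars.isspace c
    · rw [pvRunLen, if_pos hsp] at h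
      simp at h; rw [← h.1]; exact hsp
    · rw [pvRunLen, if_neg hsp] at h
      exact ih d tl' h

theorem pvWordsAux_pairwise (cs : List Char) (i : Int) :
    (pvWordsAux cs i).Pairwise (fun p q => p.2 < q.1) := by
  induction cs, i using pvWordsAux.induct with
  | case1 i => simp [pvWordsAux]
  | case2 c tl i hsp ih => rw [pvWordsAux, if_pos hsp]; exact ih
  | case3 c tl i hsp k ih =>
    rw [pvWordsAux, if_neg (by simp [hsp])]
    refine List.Pairwise.cons ?_ ih
    intro q hq
    rcases hrest : tl.drop (pvRunLen tl) with _ | ⟨d, tl'⟩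
    · rw [hrest] at hq; simp [pvWordsAux] at hq
    · rw [hrest] at hq
      have hd : PySem.Chars.isspace d = true := pvRunLen_drop_space tl d tl' hrest
      rw [pvWordsAux, if_pos hd] at hq
      have := (pvWordsAux_lb _ _ q hq).1
      simp; omega

-- membership in A's covered set = membership in some clamped raw range
theorem pvCovered_mem (n : Int) (raw : List (Int × Int)) (cov0 : PySem.Set Int) (x : Int) :
    x ∈ raw.foldl (fun cov p =>
        (PySem.List.pyRange (pvClamp n p).1 (pvClamp n p).2).foldl PySem.Set.add cov) cov0 ↔
      x ∈ cov0 ∨ ∃ p ∈ raw, (pvClamp n p).1 ≤ x ∧ x < (pvClamp n p).2 := by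
  induction raw generalizing cov0 with
  | nil => simp
  | cons r rest ih =>
    rw [List.foldl_cons, ih]
    have hfold : ∀ (ys : List Int) (c : PySem.Set Int),
        x ∈ ys.foldl PySem.Set.add c ↔ x ∈ c ∨ x ∈ ys := by
      intro ys
      induction ys with
      | nil => simp
      | cons y ys ihy => intro c; rw [List.foldl_cons, ihy]; simp [PySem.Set.mem_add]; tauto
    rw [hfold, PySem.List.mem_pyRange_one]
    simp only [List.mem_cons]
    constructor
    · rintro ((h | h) | ⟨p, hp, h⟩)
      · exact Or.inl h
      · exact Or.inr ⟨r, Or.inl rfl, h⟩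
      · exact Or.inr ⟨p, Or.inr hp, h⟩
    · rintro (h | ⟨p, (rfl | hp), h⟩)
      · exact Or.inl (Or.inl h)
      · exact Or.inl (Or.inr h)
      · exact Or.inr ⟨p, hp, h⟩

-- B's span list = the clamped nonempty raw ranges
theorem pvSpans_eq (n : Int) (raw : List (Int × Int)) (acc : List (Int × Int)) :
    raw.foldl (fun acc p =>
        if (pvClamp n p).1 < (pvClamp n p).2 then acc ++ [pvClamp n p] else acc) acc =
      acc ++ ((raw.filter (fun p => decide ((pvClamp n p).1 < (pvClamp n p).2))).map (pvClamp n)) := by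
  induction raw generalizing acc with
  | nil => simp
  | cons r rest ih =>
    rw [List.foldl_cons, List.filter_cons]
    by_cases h : (pvClamp n r).1 < (pvClamp n r).2
    · rw [if_pos h, ih]; simp [h]
    · rw [if_neg h, ih]; simp [h]

-- the pure interval fact behind "some covered char lies in the word ↔ the word meets some clamped range"
theorem pvOverlap_iff (a b c d : Int) (hab : a < b) :
    (∃ k, a ≤ k ∧ k < b ∧ c ≤ k ∧ k < d) ↔ (c < d ∧ c < b ∧ a < d) := by
  constructor
  · rintro ⟨k, h1, h2, h3, h4⟩; omega
  · rintro ⟨h1, h2, h3⟩; exact ⟨max a c, by omega, by omega, by omega, by omega⟩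

-- sorted() is the identity on a list already strictly increasing in its first key
theorem pvSorted2_id (l : List (Int × Int)) (h : l.Pairwise (fun a b => a.1 < b.1)) :
    PySem.List.sorted2 l (fun t => t.1) (fun t => t.2) = l := by
  have aux : ∀ (t acc : List (Int × Int)), (acc ++ t).Pairwise (fun a b => a.1 < b.1) →
      t.foldl (fun acc x => PySem.List.insertBy
        (fun a b => decide (a.1 < b.1) || (!decide (b.1 < a.1) && decide (a.2 < b.2))) x acc) acc
        = acc ++ t := by
    intro t
    induction t with
    | nil => simp
    | cons x rest ih =>
      intro acc hp
      rw [List.foldl_cons, PySem.List.insertBy_of_forall_not_before]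
      · have hshift : (acc ++ [x]) ++ rest = acc ++ x :: rest := by simp
        rw [ih (acc ++ [x]) (by rw [hshift]; exact hp), hshift]
      · intro y hy
        rw [List.pairwise_append] at hp
        have hxy : y.1 < x.1 := hp.2.2 y hy x (by simp)
        have h1 : ¬ (x.1 < y.1) := by omega
        simp [hxy, h1]
  exact aux l [] (by simpa using h)

theorem pvMergeLoop_id (l : List (Int × Int)) :
    ∀ (out : List (Int × Int)) (cs ce : Int),
      l.Pairwise (fun p q => p.2 < q.1) → (∀ q ∈ l, ce < q.1) →
      pvMergeLoop out cs ce l = out ++ (cs, ce) :: l := by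
  induction l with
  | nil => intros; simp [pvMergeLoop]
  | cons r rest ih =>
    rintro out cs ce hp hlt
    rcases r with ⟨lo, hi⟩
    have hce : ce < lo := by have := hlt (lo, hi) (by simp); simpa using this
    have hrest : ∀ q ∈ rest, hi < q.1 := fun q hq => (List.pairwise_cons.mp hp).1 q hq
    rw [pvMergeLoop, if_neg (by omega), ih (out ++ [(cs, ce)]) lo hi hp.tail hrest]
    simp

theorem pvMergeRanges_id (l : List (Int × Int)) (hgap : l.Pairwise (fun p q => p.2 < q.1))
    (hne : ∀ p ∈ l, p.1 < p.2) : pvMergeRanges l = l := by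
  rcases l with _ | ⟨⟨cs, ce⟩, rest⟩
  · simp [pvMergeRanges]
  · have hlt : (((cs, ce) : Int × Int) :: rest).Pairwise (fun a b => a.1 < b.1) := by
      refine hgap.imp_of_mem ?_
      intro a b ha _ hab
      have := hne a ha; omega
    rw [pvMergeRanges, if_neg (by simp), pvSorted2_id _ hlt]
    have hmatch : (match ((cs, ce) : Int × Int) :: rest with
        | [] => ([] : List (Int × Int))
        | (cs, ce) :: rest => pvMergeLoop [] cs ce rest) = pvMergeLoop [] cs ce rest := rfl
    rw [hmatch,
      pvMergeLoop_id rest [] cs ce hgap.tail (fun q hq => (List.pairwise_cons.mp hgap).1 q hq)]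
    simp

-- the two per-word predicates agree on every word span
theorem pvPred_eq (s : String) (raw : List (Int × Int)) :
    ∀ p ∈ pvWordsAux s.toList 0,
      (decide (p.1 < p.2) &&
        (PySem.List.pyRange p.1 p.2).any (fun k => PySem.Set.contains
          (raw.foldl (fun cov r =>
            (PySem.List.pyRange (pvClamp (PySem.Str.len s) r).1
              (pvClamp (PySem.Str.len s) r).2).foldl PySem.Set.add cov) PySem.Set.empty) k)) =
      ((raw.foldl (fun acc r =>
          if (pvClamp (PySem.Str.len s) r).1 < (pvClamp (PySem.Str.len s) r).2
          then acc ++ [pvClamp (PySem.Str.len s) r] else acc) []).any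
        (fun q => decide (q.1 < p.2) && decide (p.1 < q.2))) := by
  intro p hp
  have hlt : p.1 < p.2 := (pvWordsAux_lb _ _ p hp).2
  rw [Bool.eq_iff_iff, pvSpans_eq]
  simp only [Bool.and_eq_true, decide_eq_true_eq, List.any_eq_true, List.nil_append,
    List.mem_map, List.mem_filter, PySem.List.mem_pyRange_one, PySem.Set.contains_iff,
    pvCovered_mem]
  constructor
  · rintro ⟨-, k, ⟨hk1, hk2⟩, h | ⟨r, hr, hc1, hc2⟩⟩
    · simp [PySem.Set.empty] at h
    · exact ⟨pvClamp (PySem.Str.len s) r, ⟨r, ⟨hr, by omega⟩, rfl⟩, by omega, by omega⟩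
  · rintro ⟨q, ⟨r, ⟨hr, hq⟩, rfl⟩, h1, h2⟩
    refine ⟨hlt, ?_⟩
    rcases (pvOverlap_iff p.1 p.2 (pvClamp (PySem.Str.len s) r).1
      (pvClamp (PySem.Str.len s) r).2 hlt).mpr ⟨hq, h1, h2⟩ with ⟨k, u1, u2, u3, u4⟩
    exact ⟨k, ⟨u1, u2⟩, Or.inr ⟨r, hr, u3, u4⟩⟩

-- ===== VERDICT (by name: the statement is the Claim_ definition above) =====
theorem ranges_highlight_full_words_py_spec : Claim_equal_ranges_highlight_full_words_py := by
  intro s raw _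
  unfold Spec_ranges_highlight_full_words_py ranges_highlight_full_words_py
    ranges_highlight_full_words_py_alt
  by_cases hraw : raw = []
  · subst hraw
    rw [if_pos rfl, List.foldl_nil, pvPickAux_eq_filter]
    simp
  · rw [if_neg hraw, pvPickAux_eq_filter, List.filter_congr (pvPred_eq s raw)]
    apply pvMergeRanges_id
    · exact List.Pairwise.sublist List.filter_sublist (pvWordsAux_pairwise s.toList 0)
    · intro p hp
      exact (pvWordsAux_lb _ _ p (List.mem_of_mem_filter hp)).2
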